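-- pv_equiv track=rewrite | github.com/Clinohub/100_Days_of_Python | Challenges/Palindrome Checker with Wildcard.py | wild_pos_list
-- ===== SOURCE A (Python) =====
-- def wild_pos_list(astericks):
--     count = 0
--     pos = []
--     for asterick in astericks:
--         if asterick == '*':
--             pos.append(count)
--             count +=1
--     return pos
-- ===== SOURCE B (Python) =====
-- def wild_pos_list(astericks):
--     return list(range(astericks.count('*')))
-- ===== Notes on version B (the rewrite author's own statement) =====
-- stated objective: simpler
-- what changed: Replaces the interleaved counter-and-conditional-append loop with a count-then-generate decomposition: tally the asterisks once with str.count, then build the index list with list(range(n)).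
import Mathlib
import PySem

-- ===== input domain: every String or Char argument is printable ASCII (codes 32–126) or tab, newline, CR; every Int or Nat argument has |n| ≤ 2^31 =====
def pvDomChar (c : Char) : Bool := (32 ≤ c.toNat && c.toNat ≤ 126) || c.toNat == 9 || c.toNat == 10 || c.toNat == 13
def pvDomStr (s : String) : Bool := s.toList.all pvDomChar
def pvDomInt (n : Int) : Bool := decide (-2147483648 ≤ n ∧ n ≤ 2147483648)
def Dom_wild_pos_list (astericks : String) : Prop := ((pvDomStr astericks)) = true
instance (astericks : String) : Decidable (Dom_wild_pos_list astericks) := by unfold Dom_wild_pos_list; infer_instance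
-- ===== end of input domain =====

-- B replaces A's interleaved counter-and-append loop by counting '*' first and emitting range(n); objective: simpler.

-- ===== PORT A =====
-- count = 0; pos = []; for asterick in astericks: if asterick == '*': pos.append(count); count += 1; return pos
def wild_pos_list (astericks : String) : List Int :=
  (astericks.toList.foldl
    (fun (st : Int × List Int) asterick =>
      if asterick == '*' then (st.1 + 1, st.2 ++ [st.1]) else st)
    (0, [])).2

-- ===== PORT B =====
-- return list(range(astericks.count('*')))
def wild_pos_list_alt (astericks : String) : List Int :=
  PySem.List.pyRange 0 (PySem.Str.count astericks "*" : Int) 1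

-- ===== PRECONDITION & SPEC =====
def Spec_wild_pos_list (astericks : String) (out : List Int) : Prop := out = wild_pos_list_alt astericks
instance (astericks : String) (out : List Int) : Decidable (Spec_wild_pos_list astericks out) := by unfold Spec_wild_pos_list; infer_instance

-- ===== CLAIM (what is proved, stated in full; the proofs are below) =====
def Claim_equal_wild_pos_list : Prop := ∀ (astericks : String), Dom_wild_pos_list astericks → Spec_wild_pos_list astericks (wild_pos_list astericks)

-- ===== LEMMAS AND PROOFS =====

-- str.count with a single-character needle is the character count of the char list.
theorem chars_count_go_single (c : Char) (l : List Char) : ∀ (fuel acc : Nat),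
    l.length ≤ fuel → PySem.Chars.count.go [c] fuel l acc = acc + l.count c := by
  induction l with
  | nil => intro fuel acc _; cases fuel <;> simp [PySem.Chars.count.go]
  | cons h t ih =>
    intro fuel acc hf
    cases fuel with
    | zero => simp at hf
    | succ n =>
      simp only [PySem.Chars.count.go, List.isPrefixOf]
      by_cases hc : c == h
      · simp only [hc, Bool.true_and, if_true, List.length_singleton,
          List.drop_succ_cons, List.drop_zero]
        rw [ih n (acc + 1) (by simpa using Nat.le_of_succ_le_succ hf)]
        have : h = c := (beq_iff_eq.mp hc).symm
        simp [this]
        omega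
      · simp only [Bool.and_eq_true] at *
        rw [if_neg (by simp [hc]), ih n acc (by simpa using Nat.le_of_succ_le_succ hf)]
        have : ¬ h = c := fun e => hc (by simp [e])
        simp [this]

theorem str_count_star (s : String) : PySem.Str.count s "*" = s.toList.count '*' := by
  rw [PySem.Str.count_eq]
  have h1 : ("*" : String).toList = ['*'] := rfl
  rw [h1]
  unfold PySem.Chars.count
  rw [if_neg (by simp), chars_count_go_single '*' s.toList _ 0 le_rfl]
  simp

-- A's loop invariant: starting from counter c and accumulated list p,
-- the loop appends c, c+1, …, c + (count of '*') - 1.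
theorem foldA_inv (l : List Char) : ∀ (c : Int) (p : List Int),
    l.foldl (fun (st : Int × List Int) asterick =>
        if asterick == '*' then (st.1 + 1, st.2 ++ [st.1]) else st) (c, p)
      = (c + l.count '*', p ++ PySem.List.pyRange c (c + l.count '*') 1) := by
  induction l with
  | nil => intro c p; simp [PySem.List.pyRange_one_eq_nil]
  | cons h t ih =>
    intro c p
    by_cases hc : h = '*'
    · simp only [List.foldl_cons, hc, beq_self_eq_true, if_true]
      rw [ih (c + 1) (p ++ [c])]
      have hk : (0 : Int) ≤ (t.count '*' : Int) := by positivity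
      have hcnt : ((('*' :: t).count '*' : Nat) : Int) = (t.count '*' : Int) + 1 := by
        simp
      rw [hcnt]
      have he : c + ((t.count '*' : Int) + 1) = c + 1 + (t.count '*' : Int) := by ring
      rw [he]
      rw [PySem.List.pyRange_one_cons (a := c) (b := c + 1 + (t.count '*' : Int)) (by omega)]
      simp [List.append_assoc]
    · have : ¬ (h == '*') = true := by simp [hc]
      simp only [List.foldl_cons, if_neg this]
      rw [ih c p]
      simp [hc]

-- ===== VERDICT (by name: the statement is the Claim_ definition above) =====
theorem wild_pos_list_spec : Claim_equal_wild_pos_list := by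
  intro s _
  unfold Spec_wild_pos_list wild_pos_list wild_pos_list_alt
  rw [foldA_inv, str_count_star]
  simp
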